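-- pv_equiv track=rewrite | github.com/quarterback/hybrid-baseball | o27/engine/baserunning.py | wild_pitch_advance
-- ===== SOURCE A (Python) =====
-- def wild_pitch_advance(bases: list) -> tuple[list, int]:
--     """
--     Wild pitch or passed ball: all runners advance one base.
--     Returns (new_bases, runs_scored).
--     Phase 1: deterministic 1-base advance.
--     """
--     new_bases = [None, None, None]
--     runs = 0
--     for idx in [2, 1, 0]:
--         pid = bases[idx]
--         if pid is None:
--             continue
--         new_pos = idx + 1
--         if new_pos >= 3:
--             runs += 1
--         else:
--             new_bases[new_pos] = pid
--     return new_bases, runs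
-- ===== SOURCE B (Python) =====
-- def wild_pitch_advance(bases: list) -> tuple[list, int]:
--     runs = 0 if bases[2] is None else 1
--     return [None, bases[0], bases[1]], runs
-- ===== Notes on version B (the rewrite author's own statement) =====
-- stated objective: simpler
-- what changed: Replaces the reverse-indexed loop with in-place assignments by a closed-form expression: the new base list is [None, bases[0], bases[1]] and runs is 1 exactly when bases[2] is occupied.
import Mathlib
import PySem

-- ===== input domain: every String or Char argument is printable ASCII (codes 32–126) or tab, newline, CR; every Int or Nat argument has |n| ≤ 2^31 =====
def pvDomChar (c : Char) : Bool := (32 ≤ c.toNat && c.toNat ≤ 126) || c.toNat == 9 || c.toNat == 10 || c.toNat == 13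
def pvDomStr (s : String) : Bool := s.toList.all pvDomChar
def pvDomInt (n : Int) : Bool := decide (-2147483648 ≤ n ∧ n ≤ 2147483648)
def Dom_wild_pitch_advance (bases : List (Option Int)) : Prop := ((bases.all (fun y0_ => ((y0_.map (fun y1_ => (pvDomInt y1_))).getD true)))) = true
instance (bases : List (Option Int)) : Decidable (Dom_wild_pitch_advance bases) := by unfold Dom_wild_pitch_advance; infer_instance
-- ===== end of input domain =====

-- ===== PORT A =====
-- Loop `for idx in [2,1,0]` as a foldl over the same state (new_bases, runs);
-- bases[idx] via PySem.List.pyGet? (none = IndexError, excluded by Pre_);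
-- new_bases[new_pos] = pid via List.set (new_pos is 1 or 2, always in range of the length-3 list).
def wild_pitch_advance (bases : List (Option Int)) : List (Option Int) × Int :=
  [(2 : Int), 1, 0].foldl (fun st idx =>
    match PySem.List.pyGet? bases idx with
    | none => st                 -- IndexError: outside Pre_
    | some none => st            -- pid is None: continue
    | some (some pid) =>
      if idx + 1 ≥ 3 then (st.1, st.2 + 1)
      else (st.1.set (idx + 1).toNat (some pid), st.2))
    (([none, none, none] : List (Option Int)), (0 : Int))

-- ===== PORT B =====
-- Closed form: bases[2] decides the run; new bases are [None, bases[0], bases[1]].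
def wild_pitch_advance_alt (bases : List (Option Int)) : List (Option Int) × Int :=
  match PySem.List.pyGet? bases 2, PySem.List.pyGet? bases 0, PySem.List.pyGet? bases 1 with
  | some third, some b0, some b1 =>
      ([none, b0, b1], if third = none then 0 else 1)
  | _, _, _ => ([], 0)           -- IndexError: outside Pre_

-- ===== PRECONDITION =====
-- A raises IndexError on lists shorter than 3 (it reads bases[2]); those are excluded.
def Pre_wild_pitch_advance (bases : List (Option Int)) : Prop := 3 ≤ bases.length
instance (bases : List (Option Int)) : Decidable (Pre_wild_pitch_advance bases) := by unfold Pre_wild_pitch_advance; infer_instance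
def pvWitness_wild_pitch_advance : List (Option Int) := [some 7, none, some 3]

-- ===== PRECONDITION & SPEC =====
def Spec_wild_pitch_advance (bases : List (Option Int)) (out : List (Option Int) × Int) : Prop := out = wild_pitch_advance_alt bases
instance (bases : List (Option Int)) (out : List (Option Int) × Int) : Decidable (Spec_wild_pitch_advance bases out) := by unfold Spec_wild_pitch_advance; infer_instance

-- ===== CLAIM (what is proved, stated in full; the proofs are below) =====
def Claim_equal_wild_pitch_advance : Prop := ∀ (bases : List (Option Int)), Dom_wild_pitch_advance bases → Pre_wild_pitch_advance bases → Spec_wild_pitch_advance bases (wild_pitch_advance bases)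

-- ===== LEMMAS AND PROOFS =====

-- ===== VERDICT (by name: the statement is the Claim_ definition above) =====
theorem wild_pitch_advance_spec : Claim_equal_wild_pitch_advance := by
  intro bases _ hpre
  match bases, hpre with
  | a :: b :: c :: rest, _ =>
    have h0 : PySem.List.pyGet? (a :: b :: c :: rest) 0 = some a := by
      rw [show (0 : Int) = ((0 : Nat) : Int) by rfl, PySem.List.pyGet?_natCast]; rfl
    have h1 : PySem.List.pyGet? (a :: b :: c :: rest) 1 = some b := by
      rw [show (1 : Int) = ((1 : Nat) : Int) by rfl, PySem.List.pyGet?_natCast]; rfl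
    have h2 : PySem.List.pyGet? (a :: b :: c :: rest) 2 = some c := by
      rw [show (2 : Int) = ((2 : Nat) : Int) by rfl, PySem.List.pyGet?_natCast]; rfl
    unfold Spec_wild_pitch_advance wild_pitch_advance wild_pitch_advance_alt
    simp only [List.foldl_cons, List.foldl_nil, h0, h1, h2]
    cases a <;> cases b <;> cases c <;> simp
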